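-- pv_equiv track=rewrite | github.com/IstiN/trackstate | testing/tests/TS-707/test_ts_707.py | _runner_guard_reason
-- ===== SOURCE A (Python) =====
-- def _runner_guard_reason(log_excerpt: str) -> str:
--     for token in (
--         "No runner registered",
--         "none are online",
--         "Bring the TrackState release runner online",
--         "Provision the TrackState maintainer-owned macOS release runner",
--     ):
--         for line in log_excerpt.splitlines():
--             if token in line:
--                 return line.strip()
--     return ""
-- ===== SOURCE B (Python) =====
-- def _runner_guard_reason(log_excerpt: str) -> str:
--     tokens = (
--         "No runner registered",
--         "none are online",
--         "Bring the TrackState release runner online",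
--         "Provision the TrackState maintainer-owned macOS release runner",
--     )
--     best = None  # (token_priority, line), minimal priority seen so far; earlier line wins ties
--     for line in log_excerpt.splitlines():
--         pr = min((i for i, t in enumerate(tokens) if t in line), default=None)
--         if pr is not None and (best is None or pr < best[0]):
--             best = (pr, line)
--     return best[1].strip() if best is not None else ""
-- ===== Notes on version B (the rewrite author's own statement) =====
-- stated objective: alternative
-- what changed: Replaced A's token-outer/line-inner early-return double scan by a single pass over the lines that computes each line's minimal token-priority and keeps the best (priority, line-index) candidate.
import Mathlib
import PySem

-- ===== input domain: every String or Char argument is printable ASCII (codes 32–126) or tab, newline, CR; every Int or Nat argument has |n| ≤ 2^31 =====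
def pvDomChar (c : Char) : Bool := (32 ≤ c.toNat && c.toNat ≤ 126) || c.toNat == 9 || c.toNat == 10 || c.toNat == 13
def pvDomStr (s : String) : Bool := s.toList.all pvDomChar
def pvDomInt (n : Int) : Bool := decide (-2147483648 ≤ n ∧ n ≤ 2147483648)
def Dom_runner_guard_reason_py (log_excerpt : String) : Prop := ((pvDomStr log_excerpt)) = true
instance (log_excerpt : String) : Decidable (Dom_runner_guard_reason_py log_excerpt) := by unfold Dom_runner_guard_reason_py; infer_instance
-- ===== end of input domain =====

-- B replaces A's token-outer/line-inner early-return double scan by one pass over the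
-- lines keeping the best (token-priority, line) candidate; same cost, different structure.

-- the fixed guard phrases, in priority order (shared data of both programs)
def pvTokens : List String :=
  ["No runner registered",
   "none are online",
   "Bring the TrackState release runner online",
   "Provision the TrackState maintainer-owned macOS release runner"]

-- ===== PORT A =====
-- inner 'for line in …: if token in line: return line.strip()' loop
def pvFindLineA (token : String) : List String → Option String
  | [] => none
  | l :: rest => if PySem.Str.isIn token l then some l else pvFindLineA token rest

-- outer 'for token in (…):' loop with early return
def pvTokenLoopA : List String → List String → String
  | [], _ => ""
  | t :: ts, lines =>
    match pvFindLineA t lines with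
    | some l => PySem.Str.strip l
    | none => pvTokenLoopA ts lines

def runner_guard_reason_py (log_excerpt : String) : String :=
  pvTokenLoopA pvTokens (PySem.Str.splitlines log_excerpt)

-- ===== PORT B =====
-- pr = min((i for i, t in enumerate(tokens) if t in line), default=None)
def pvPrioB (line : String) : Option Int :=
  PySem.List.min?
    (((PySem.List.enumerate pvTokens).filter (fun p => PySem.Str.isIn p.2 line)).map
      (fun p => p.1))
    (fun x => x)

-- one iteration of the line loop: keep the best (priority, line)
def pvStepB (best : Option (Int × String)) (line : String) : Option (Int × String) :=
  match pvPrioB line with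
  | none => best
  | some pr =>
    match best with
    | none => some (pr, line)
    | some b => if pr < b.1 then some (pr, line) else best

def runner_guard_reason_py_alt (log_excerpt : String) : String :=
  match (PySem.Str.splitlines log_excerpt).foldl pvStepB none with
  | some b => PySem.Str.strip b.2
  | none => ""

-- ===== PRECONDITION & SPEC =====
def Spec_runner_guard_reason_py (log_excerpt : String) (out : String) : Prop := out = runner_guard_reason_py_alt log_excerpt
instance (log_excerpt : String) (out : String) : Decidable (Spec_runner_guard_reason_py log_excerpt out) := by unfold Spec_runner_guard_reason_py; infer_instance

-- ===== CLAIM (what is proved, stated in full; the proofs are below) =====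
def Claim_equal_runner_guard_reason_py : Prop := ∀ (log_excerpt : String), Dom_runner_guard_reason_py log_excerpt → Spec_runner_guard_reason_py log_excerpt (runner_guard_reason_py log_excerpt)

-- ===== LEMMAS AND PROOFS =====

-- proof-side generic versions, parameterised by the token list
def gPrio (ts : List String) (line : String) : Option Int :=
  match ts with
  | [] => none
  | t :: ts' => if PySem.Str.isIn t line then some 0 else (gPrio ts' line).map (· + 1)

def gStep (ts : List String) (best : Option (Int × String)) (line : String) :
    Option (Int × String) :=
  match gPrio ts line with
  | none => best
  | some pr =>
    match best with
    | none => some (pr, line)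
    | some b => if pr < b.1 then some (pr, line) else best

def gRender : Option (Int × String) → String
  | some b => PySem.Str.strip b.2
  | none => ""

lemma gPrio_nonneg (ts : List String) (line : String) (p : Int)
    (h : gPrio ts line = some p) : 0 ≤ p := by
  induction ts generalizing p with
  | nil => simp [gPrio] at h
  | cons t ts ih =>
    simp only [gPrio] at h
    split at h
    · simp only [Option.some.injEq] at h; omega
    · cases hq : gPrio ts line with
      | none => simp [hq] at h
      | some q => simp [hq] at h; have := ih q hq; omega

lemma prioB_eq_gPrio (line : String) : pvPrioB line = gPrio pvTokens line := by
  by_cases h0 : PySem.Str.isIn "No runner registered" line = true <;>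
  by_cases h1 : PySem.Str.isIn "none are online" line = true <;>
  by_cases h2 : PySem.Str.isIn "Bring the TrackState release runner online" line = true <;>
  by_cases h3 : PySem.Str.isIn "Provision the TrackState maintainer-owned macOS release runner" line = true <;>
  simp at h0 h1 h2 h3 <;>
  simp [pvPrioB, gPrio, pvTokens, PySem.List.enumerate, PySem.List.min?, h0, h1, h2, h3]

lemma stepB_eq_gStep : pvStepB = gStep pvTokens := by
  funext b l
  simp only [pvStepB, gStep, prioB_eq_gPrio]

lemma gStep_nil_foldl (lines : List String) (acc : Option (Int × String)) :
    lines.foldl (gStep []) acc = acc := by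
  induction lines generalizing acc with
  | nil => rfl
  | cons x rest ih => simpa [gStep, gPrio] using ih acc

-- rfl unfoldings (kept at the Str level, away from the simp bridge to Chars)
lemma findA_cons (t x : String) (rest : List String) :
    pvFindLineA t (x :: rest)
      = if PySem.Str.isIn t x then some x else pvFindLineA t rest := rfl

lemma gPrio_cons (t : String) (ts : List String) (line : String) :
    gPrio (t :: ts) line
      = if PySem.Str.isIn t line then some 0 else (gPrio ts line).map (· + 1) := rfl

lemma findA_none_iff (t : String) (lines : List String) :
    pvFindLineA t lines = none ↔ ∀ l ∈ lines, PySem.Str.isIn t l = false := by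
  induction lines with
  | nil => simp [pvFindLineA]
  | cons x rest ih =>
    rw [findA_cons]
    cases hx : PySem.Str.isIn t x with
    | true =>
      rw [if_pos rfl]
      constructor
      · intro h; cases h
      · intro h; have := h x (by simp); rw [hx] at this; simp at this
    | false =>
      rw [if_neg Bool.false_ne_true]
      constructor
      · intro h l hl
        rcases List.mem_cons.1 hl with rfl | hl
        · exact hx
        · exact (ih.1 h) l hl
      · intro h; exact ih.2 (fun l hl => h l (by simp [hl]))

-- once the best has priority 0 it never changes
lemma gStep_zero (t : String) (ts : List String) (l x : String) :
    gStep (t :: ts) (some (0, l)) x = some (0, l) := by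
  unfold gStep
  cases hp : gPrio (t :: ts) x with
  | none => rfl
  | some p =>
    have h0 := gPrio_nonneg _ _ _ hp
    show (if p < (0 : Int) then some (p, x) else some (0, l)) = some (0, l)
    rw [if_neg (by omega)]

lemma foldl_after0 (t : String) (ts : List String) (lines : List String) (l : String) :
    lines.foldl (gStep (t :: ts)) (some (0, l)) = some (0, l) := by
  induction lines with
  | nil => rfl
  | cons x rest ih => rw [List.foldl_cons, gStep_zero]; exact ih

-- if some line contains t, the fold over (t :: ts) ends at (0, first such line)
lemma foldl_first0 (t : String) (ts : List String) (lines : List String) (l : String)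
    (acc : Option (Int × String))
    (hacc : acc = none ∨ ∃ p s, acc = some (p, s) ∧ 0 < p)
    (hfind : pvFindLineA t lines = some l) :
    lines.foldl (gStep (t :: ts)) acc = some (0, l) := by
  induction lines generalizing acc with
  | nil => cases hfind
  | cons x rest ih =>
    rw [findA_cons] at hfind
    cases hx : PySem.Str.isIn t x with
    | true =>
      rw [if_pos hx, Option.some.injEq] at hfind
      subst hfind
      have hstep : gStep (t :: ts) acc x = some (0, x) := by
        unfold gStep
        rw [gPrio_cons, if_pos hx]

        rcases hacc with rfl | ⟨p, s, rfl, hp⟩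
        · rfl
        · show (if (0 : Int) < p then some ((0 : Int), x) else some (p, s)) = some (0, x)
          rw [if_pos hp]
      rw [List.foldl_cons, hstep]
      exact foldl_after0 t ts rest x
    | false =>
      rw [if_neg (by rw [hx]; exact Bool.false_ne_true)] at hfind
      rw [List.foldl_cons]
      apply ih _ _ hfind
      -- the invariant (priority absent or positive) is preserved on a line without t
      unfold gStep
      rw [gPrio_cons, if_neg (by rw [hx]; exact Bool.false_ne_true)]
      cases hq : gPrio ts x with
      | none => exact hacc
      | some q =>
        have hq0 := gPrio_nonneg _ _ _ hq
        rcases hacc with rfl | ⟨p, s, rfl, hp⟩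
        · exact Or.inr ⟨q + 1, x, rfl, by omega⟩
        · refine Or.inr ?_
          by_cases hlt : q + 1 < p
          · refine ⟨q + 1, x, ?_, by omega⟩
            show (if q + 1 < p then some (q + 1, x) else some (p, s)) = some (q + 1, x)
            rw [if_pos hlt]
          · refine ⟨p, s, ?_, hp⟩
            show (if q + 1 < p then some (q + 1, x) else some (p, s)) = some (p, s)
            rw [if_neg hlt]

def gShift : Option (Int × String) → Option (Int × String) :=
  Option.map (fun b => (b.1 + 1, b.2))

-- if no line contains t, the fold over (t :: ts) is the fold over ts with shifted priorities
lemma foldl_shift (t : String) (ts : List String) (lines : List String)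
    (acc : Option (Int × String))
    (hno : ∀ l ∈ lines, PySem.Str.isIn t l = false) :
    lines.foldl (gStep (t :: ts)) (gShift acc) = gShift (lines.foldl (gStep ts) acc) := by
  induction lines generalizing acc with
  | nil => rfl
  | cons x rest ih =>
    have hx : PySem.Str.isIn t x = false := hno x (by simp)
    have hstep : gStep (t :: ts) (gShift acc) x = gShift (gStep ts acc x) := by
      unfold gStep
      rw [gPrio_cons, if_neg (by rw [hx]; exact Bool.false_ne_true)]
      cases hq : gPrio ts x with
      | none => rfl
      | some q =>
        cases acc with
        | none => rfl
        | some b =>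
          show (if q + 1 < b.1 + 1 then some (q + 1, x) else some (b.1 + 1, b.2))
              = gShift (if q < b.1 then some (q, x) else some b)
          by_cases hlt : q < b.1
          · rw [if_pos hlt, if_pos (by omega)]; rfl
          · rw [if_neg hlt, if_neg (by omega)]; rfl
    rw [List.foldl_cons, hstep, ih _ (fun l hl => hno l (by simp [hl])), List.foldl_cons]

lemma main_gen (ts : List String) (lines : List String) :
    pvTokenLoopA ts lines = gRender (lines.foldl (gStep ts) none) := by
  induction ts with
  | nil => simp [pvTokenLoopA, gStep_nil_foldl, gRender]
  | cons t ts ih =>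
    cases hfind : pvFindLineA t lines with
    | some l =>
      have := foldl_first0 t ts lines l none (Or.inl rfl) hfind
      simp [pvTokenLoopA, hfind, this, gRender]
    | none =>
      have hno := (findA_none_iff t lines).1 hfind
      have hsh : lines.foldl (gStep (t :: ts)) none
          = gShift (lines.foldl (gStep ts) none) := foldl_shift t ts lines none hno
      have hrender : gRender (gShift (lines.foldl (gStep ts) none))
          = gRender (lines.foldl (gStep ts) none) := by
        cases lines.foldl (gStep ts) none <;> rfl
      simp [pvTokenLoopA, hfind, hsh, hrender, ih]

-- ===== VERDICT (by name: the statement is the Claim_ definition above) =====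
theorem runner_guard_reason_py_spec : Claim_equal_runner_guard_reason_py := by
  intro s _
  unfold Spec_runner_guard_reason_py runner_guard_reason_py runner_guard_reason_py_alt
  rw [stepB_eq_gStep, main_gen]
  cases (PySem.Str.splitlines s).foldl (gStep pvTokens) none <;> rfl
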